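-- pv_equiv track=rewrite | github.com/nooransari911/tools-2025 | projects/Knowledge Base/py_practice/flag-ip.py | detect_ddos
-- ===== SOURCE A (Python) =====
-- from collections import defaultdict
--
-- def detect_ddos(logs, T, K):
--     """
--     Detects DDoS attacks from a log of requests (CORRECTED).
--
--     Args:
--         logs: A list of tuples, where each tuple is (timestamp, ip_address).
--         T: The time window in seconds.
--         K: The maximum allowed requests within the time window.
--
--     Returns:
--         A sorted list of IP addresses that should be flagged, or an empty list
--         if no threats are detected. Returns ["No Threats Detected"] as a list.
--     """
--     ip_timestamps = defaultdict(list)  # Store timestamps for each IP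
--     flagged_ips = set()
--
--     # 1. Build the complete timestamp list for EACH IP.
--     for timestamp, ip in logs:
--         ip_timestamps[ip].append(timestamp)
--
--     # 2. Process EACH IP's timestamps to check for DDoS.
--     for ip, timestamps in ip_timestamps.items():
--         # Iterate through the timestamps for the current IP.
--         for i in range(len(timestamps)):
--             # Calculate the window start for the *current* timestamp.
--             window_start = timestamps[i] - T
--
--             # Count requests within the current window.
--             count = 0
--             for j in range(i, -1, -1):  # Iterate backwards from current timestamp.
--                 if timestamps[j] > window_start:
--                     count += 1
--                 else:
--                     break # Optimization: Stop when outside the window.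
--
--             if count > K:
--                 flagged_ips.add(ip)
--                 break  # Once flagged, no need to check further for this IP.
--
--
--     if not flagged_ips:
--         return ["No Threats Detected"]
--     else:
--         return sorted(list(flagged_ips))
-- ===== SOURCE B (Python) =====
-- def _attacked(ts, T, K):
--     """Some position sees more than K requests in its trailing window of length T.
--
--     For K >= 0 that means: some index i >= K whose K+1 most recent timestamps
--     (in log order) are all inside the window (ts[i] - T, ts[i]]; the run is
--     contiguous, so it suffices that the minimum of that window exceeds ts[i] - T.
--     For K < 0 any single request already exceeds the allowance.
--     """
--     if K < 0:
--         return bool(ts)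
--     return any(min(ts[i - K:i + 1]) > ts[i] - T for i in range(K, len(ts)))
--
--
-- def detect_ddos(logs, T, K):
--     groups = {}
--     for t, ip in logs:
--         groups.setdefault(ip, []).append(t)
--     flagged = sorted(ip for ip, ts in groups.items() if _attacked(ts, T, K))
--     return flagged if flagged else ["No Threats Detected"]
-- ===== Notes on version B (the rewrite author's own statement) =====
-- stated objective: alternative
-- what changed: Per-IP backward run-counting with a counter and break is replaced by a fixed-size window test: an IP is flagged iff some index i>=K has min(ts[i-K:i+1]) > ts[i]-T (for K<0 any IP with a request); flagged IPs are a sorted filter over the groups instead of a set grown inside three nested loops.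
import Mathlib
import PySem

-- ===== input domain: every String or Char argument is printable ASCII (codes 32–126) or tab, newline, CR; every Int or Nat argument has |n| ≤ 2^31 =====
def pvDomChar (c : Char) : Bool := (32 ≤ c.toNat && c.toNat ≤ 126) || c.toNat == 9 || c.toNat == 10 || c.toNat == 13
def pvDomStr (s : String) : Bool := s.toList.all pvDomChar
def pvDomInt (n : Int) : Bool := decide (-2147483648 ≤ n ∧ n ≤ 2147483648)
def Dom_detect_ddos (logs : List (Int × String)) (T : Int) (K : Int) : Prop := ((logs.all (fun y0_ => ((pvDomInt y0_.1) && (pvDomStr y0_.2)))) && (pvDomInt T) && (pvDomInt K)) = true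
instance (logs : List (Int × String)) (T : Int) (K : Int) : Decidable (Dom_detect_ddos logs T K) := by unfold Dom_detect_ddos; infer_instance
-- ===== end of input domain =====

-- B replaces A's per-IP backward run-counting (counter + break) by a fixed-size
-- window-minimum test and builds the flagged list as a sorted filter over the groups;
-- return values are proved equal on all inputs.

-- ===== PORT A =====
-- inner loop: for j in range(i, -1, -1): if timestamps[j] > window_start: count += 1 else: break
def pvA_count (ts : List Int) (ws : Int) : Nat → Int
  | 0 => if ws < PySem.List.pyGetD ts ((0 : Nat) : Int) 0 then 1 else 0
  | j + 1 => if ws < PySem.List.pyGetD ts ((j + 1 : Nat) : Int) 0 then 1 + pvA_count ts ws j else 0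

-- per-IP loop over i in range(len(timestamps)) with break once flagged
def pvA_flag (ts : List Int) (T : Int) (K : Int) : Bool :=
  (List.range ts.length).any (fun i =>
    decide (K < pvA_count ts (PySem.List.pyGetD ts (i : Int) 0 - T) i))

def detect_ddos (logs : List (Int × String)) (T : Int) (K : Int) : List String :=
  let ip_timestamps := logs.foldl (fun d p => d.modify p.2 [] (fun l => l ++ [p.1]))
    (PySem.Dict.empty : PySem.Dict String (List Int))
  let flagged_ips := ip_timestamps.items.foldl
    (fun s p => if pvA_flag p.2 T K then PySem.Set.add s p.1 else s) (PySem.Set.empty : PySem.Set String)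
  if flagged_ips.isEmpty then ["No Threats Detected"]
  else PySem.List.sorted flagged_ips (fun x => x) false

-- ===== PORT B =====
-- an IP is attacked iff some index i >= K has min(ts[i-K:i+1]) > ts[i] - T; K < 0 flags any request
def pvB_attacked (ts : List Int) (T : Int) (K : Int) : Bool :=
  if K < 0 then !ts.isEmpty
  else (PySem.List.pyRange K (ts.length : Int) 1).any (fun i =>
    match PySem.List.min? (PySem.List.slice ts (some (i - K)) (some (i + 1))) (fun x => x) with
    | some m => decide (PySem.List.pyGetD ts i 0 - T < m)
    | none => false)  -- unreachable: the window ts[i-K:i+1] is nonempty for K <= i < len(ts)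

def detect_ddos_alt (logs : List (Int × String)) (T : Int) (K : Int) : List String :=
  let groups := logs.foldl (fun d p => d.modify p.2 [] (fun l => l ++ [p.1]))
    (PySem.Dict.empty : PySem.Dict String (List Int))
  let flagged := PySem.List.sorted
    ((groups.items.filter (fun p => pvB_attacked p.2 T K)).map (fun p => p.1)) (fun x => x) false
  if flagged.isEmpty then ["No Threats Detected"] else flagged

-- ===== PRECONDITION & SPEC =====
def Spec_detect_ddos (logs : List (Int × String)) (T : Int) (K : Int) (out : List String) : Prop := out = detect_ddos_alt logs T K
instance (logs : List (Int × String)) (T : Int) (K : Int) (out : List String) : Decidable (Spec_detect_ddos logs T K out) := by unfold Spec_detect_ddos; infer_instance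

-- ===== CLAIM (what is proved, stated in full; the proofs are below) =====
def Claim_equal_detect_ddos : Prop := ∀ (logs : List (Int × String)) (T : Int) (K : Int), Dom_detect_ddos logs T K → Spec_detect_ddos logs T K (detect_ddos logs T K)

-- ===== LEMMAS AND PROOFS =====

-- the backward count is never negative
theorem pvA_count_nonneg (ts : List Int) (ws : Int) (i : Nat) : 0 ≤ pvA_count ts ws i := by
  induction i with
  | zero => simp [pvA_count]; split_ifs <;> omega
  | succ j ih => simp [pvA_count]; split_ifs <;> omega

-- A's break-counting loop exceeds k iff positions i-k..i all lie strictly above ws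
theorem pvA_count_gt (ts : List Int) (ws : Int) (k : Nat) :
    ∀ i : Nat, ((k : Int) < pvA_count ts ws i) ↔
      (k ≤ i ∧ ∀ j : Nat, i - k ≤ j → j ≤ i → ws < PySem.List.pyGetD ts (j : Int) 0) := by
  induction k with
  | zero =>
    intro i
    cases i with
    | zero =>
      simp only [pvA_count]
      split_ifs with h
      · simp only [Nat.cast_zero]
        constructor
        · intro _; exact ⟨le_refl 0, fun j h1 h2 => by interval_cases j; exact h⟩
        · intro _; norm_num
      · constructor
        · intro hc; norm_num at hc
        · rintro ⟨-, hall⟩; exact absurd (hall 0 (by omega) (by omega)) h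
    | succ m =>
      simp only [pvA_count]
      split_ifs with h
      · constructor
        · intro _
          refine ⟨by omega, fun j h1 h2 => ?_⟩
          have : j = m + 1 := by omega
          subst this; exact h
        · intro _
          have := pvA_count_nonneg ts ws m
          push_cast; omega
      · constructor
        · intro hc; norm_num at hc
        · rintro ⟨-, hall⟩; exact absurd (hall (m+1) (by omega) (by omega)) h
  | succ k ih =>
    intro i
    cases i with
    | zero =>
      simp only [pvA_count]
      constructor
      · intro hc
        split_ifs at hc <;> push_cast at hc <;> omega
      · rintro ⟨hle, -⟩; omega
    | succ m =>
      simp only [pvA_count]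
      split_ifs with h
      · have hsub : m + 1 - (k + 1) = m - k := by omega
        rw [show ((((k:Nat)+1:Nat)) : Int) < 1 + pvA_count ts ws m ↔ (k:Int) < pvA_count ts ws m by push_cast; omega]
        rw [ih m, hsub]
        constructor
        · rintro ⟨h1, h2⟩
          refine ⟨by omega, fun j hj1 hj2 => ?_⟩
          rcases Nat.lt_or_ge j (m+1) with hj | hj
          · exact h2 j hj1 (by omega)
          · have : j = m + 1 := by omega
            subst this; exact h
        · rintro ⟨h1, h2⟩
          exact ⟨by omega, fun j hj1 hj2 => h2 j hj1 (by omega)⟩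
      · constructor
        · intro hc; push_cast at hc; omega
        · rintro ⟨h1, h2⟩
          exact absurd (h2 (m+1) (by omega) (by omega)) h
theorem mem_drop_take {α : Type} (ts : List α) (a b : Nat) (y : α) :
    y ∈ (ts.drop a).take b ↔ ∃ j : Nat, a ≤ j ∧ j < a + b ∧ ts[j]? = some y := by
  constructor
  · intro hy
    obtain ⟨n, hn, hget⟩ := List.mem_iff_getElem.mp hy
    have hn' : n < b ∧ a + n < ts.length := by
      simp only [List.length_take, List.length_drop] at hn; omega
    refine ⟨a + n, by omega, by omega, ?_⟩
    rw [List.getElem_take, List.getElem_drop] at hget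
    rw [List.getElem?_eq_getElem hn'.2, hget]
  · rintro ⟨j, h1, h2, h3⟩
    have hj : j < ts.length := by
      by_contra h
      rw [List.getElem?_eq_none (by omega)] at h3; simp at h3
    refine List.mem_iff_getElem.mpr ⟨j - a, ?_, ?_⟩
    · simp [List.length_take, List.length_drop]; omega
    · rw [List.getElem?_eq_getElem hj] at h3
      rw [List.getElem_take, List.getElem_drop]
      exact (getElem_congr (rfl : ts = ts) (by omega : a + (j - a) = j) (by omega)).trans (Option.some_injective _ h3)

-- B's window-minimum test unfolded to the same per-position condition
theorem pvB_window (ts : List Int) (k iN : Nat) (hk : k ≤ iN) (hi : iN < ts.length) (c : Int) :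
    (match PySem.List.min? (PySem.List.slice ts (some ((iN : Int) - (k : Int))) (some ((iN : Int) + 1))) (fun x => x) with
     | some m => decide (c < m)
     | none => false) = true
    ↔ ∀ j : Nat, iN - k ≤ j → j ≤ iN → c < PySem.List.pyGetD ts (j : Int) 0 := by
  have hcast1 : (iN : Int) - (k : Int) = ((iN - k : Nat) : Int) := by omega
  have hcast2 : (iN : Int) + 1 = ((iN + 1 : Nat) : Int) := by push_cast; ring
  rw [hcast1, hcast2, PySem.List.slice_natCast]
  set w := (ts.drop (iN - k)).take (iN + 1 - (iN - k)) with hw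
  have hwne : w ≠ [] := by
    have hlen : w.length = min (iN + 1 - (iN - k)) (ts.length - (iN - k)) := by
      simp [hw, List.length_take, List.length_drop]
    intro h; rw [h] at hlen; simp at hlen; omega
  have hget : ∀ (j : Nat) (hj : j < ts.length), PySem.List.pyGetD ts (j : Int) 0 = ts[j]'hj := by
    intro j hj
    rw [PySem.List.pyGetD_natCast, List.getD_eq_getElem?_getD, List.getElem?_eq_getElem hj]
    rfl
  cases hmin : PySem.List.min? w (fun x => x) with
  | none => exact absurd ((PySem.List.min?_eq_none_iff w (fun x => x)).mp hmin) hwne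
  | some m =>
    simp only [decide_eq_true_eq]
    constructor
    · intro hcm j hj1 hj2
      have hmem : ts[j]'(by omega) ∈ w := by
        rw [hw, mem_drop_take]
        exact ⟨j, hj1, by omega, List.getElem?_eq_getElem (by omega)⟩
      have hle := PySem.List.min?_isMin hmin (ts[j]'(by omega)) hmem
      rw [hget j (by omega)]
      exact lt_of_lt_of_le hcm hle
    · intro hall
      have hmemm := PySem.List.min?_mem hmin
      rw [hw, mem_drop_take] at hmemm
      obtain ⟨j, hj1, hj2, hj3⟩ := hmemm
      have hjlen : j < ts.length := by
        by_contra h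
        rw [List.getElem?_eq_none (by omega)] at hj3; simp at hj3
      have := hall j hj1 (by omega)
      rw [hget j hjlen] at this
      rw [List.getElem?_eq_getElem hjlen] at hj3
      rw [← Option.some_injective _ hj3]
      exact this

-- the per-IP verdicts agree
theorem flag_eq (ts : List Int) (T K : Int) : pvA_flag ts T K = pvB_attacked ts T K := by
  rw [Bool.eq_iff_iff]
  unfold pvA_flag pvB_attacked
  by_cases hK : K < 0
  · rw [if_pos hK]
    constructor
    · intro h
      rw [List.any_eq_true] at h
      obtain ⟨i, hi, -⟩ := h
      rw [List.mem_range] at hi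
      simp only [Bool.not_eq_eq_eq_not, Bool.not_true, List.isEmpty_eq_false_iff, ne_eq]
      intro hnil; rw [hnil] at hi; simp at hi
    · intro h
      have hlen : 0 < ts.length := by
        simp only [Bool.not_eq_eq_eq_not, Bool.not_true, List.isEmpty_eq_false_iff, ne_eq] at h
        cases ts with
        | nil => exact absurd rfl h
        | cons a t => simp
      rw [List.any_eq_true]
      refine ⟨0, List.mem_range.mpr hlen, ?_⟩
      simp only [decide_eq_true_eq]
      have := pvA_count_nonneg ts (PySem.List.pyGetD ts ((0 : Nat) : Int) 0 - T) 0
      omega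
  · rw [Int.not_lt] at hK
    rw [if_neg (Int.not_lt.mpr hK)]
    obtain ⟨k, rfl⟩ := Int.eq_ofNat_of_zero_le hK
    constructor
    · intro h
      rw [List.any_eq_true] at h ⊢
      obtain ⟨i, hi, hdec⟩ := h
      rw [List.mem_range] at hi
      rw [decide_eq_true_eq, pvA_count_gt] at hdec
      obtain ⟨hki, hall⟩ := hdec
      refine ⟨(i : Int), PySem.List.mem_pyRange_one.mpr ⟨by exact_mod_cast hki, by exact_mod_cast hi⟩, ?_⟩
      exact (pvB_window ts k i hki hi _).mpr hall
    · intro h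
      rw [List.any_eq_true] at h ⊢
      obtain ⟨i, hi, hbody⟩ := h
      rw [PySem.List.mem_pyRange_one] at hi
      have h0 : 0 ≤ i := le_trans (by positivity) hi.1
      obtain ⟨iN, rfl⟩ := Int.eq_ofNat_of_zero_le h0
      have hki : k ≤ iN := by exact_mod_cast hi.1
      have hilen : iN < ts.length := by exact_mod_cast hi.2
      refine ⟨iN, List.mem_range.mpr hilen, ?_⟩
      rw [decide_eq_true_eq, pvA_count_gt]
      exact ⟨hki, (pvB_window ts k iN hki hilen _).mp hbody⟩

-- growing a set through a conditional loop over pairs with distinct keys is filter-then-project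
theorem foldl_set_add_filter {κ ν : Type} [BEq κ] [LawfulBEq κ] (pred : κ × ν → Bool) :
    ∀ (l : List (κ × ν)) (s : List κ), (l.map Prod.fst).Nodup → (∀ p ∈ l, p.1 ∉ s) →
      l.foldl (fun s p => if pred p then PySem.Set.add s p.1 else s) s
        = s ++ (l.filter pred).map (fun p => p.1) := by
  intro l
  induction l with
  | nil => intro s _ _; simp
  | cons p t ih =>
    intro s hnd hdisj
    rw [List.map_cons, List.nodup_cons] at hnd
    rw [List.foldl_cons]
    by_cases hp : pred p = true
    · rw [if_pos hp, PySem.Set.add_of_not_mem (hdisj p (List.mem_cons_self))]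
      rw [ih (s ++ [p.1]) hnd.2 ?_]
      · rw [List.filter_cons_of_pos hp, List.map_cons, List.append_cons]; simp
      · intro q hq
        simp only [List.mem_append, List.mem_singleton]
        rintro (hqs | hqp)
        · exact hdisj q (List.mem_cons_of_mem _ hq) hqs
        · exact hnd.1 (hqp ▸ List.mem_map_of_mem hq)
    · rw [if_neg hp, ih s hnd.2 (fun q hq => hdisj q (List.mem_cons_of_mem _ hq)),
        List.filter_cons_of_neg (by simpa using hp)]
theorem main_eq (logs : List (Int × String)) (T K : Int) :
    detect_ddos logs T K = detect_ddos_alt logs T K := by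
  unfold detect_ddos detect_ddos_alt
  simp only []
  set d := logs.foldl (fun d p => d.modify p.2 [] (fun l => l ++ [p.1]))
    (PySem.Dict.empty : PySem.Dict String (List Int)) with hd
  have hnd : (d.items.map Prod.fst).Nodup := by
    have h := PySem.Dict.nodup_keys_foldl_modify_key logs (fun p => p.2) []
      (fun _ p => (fun l => l ++ [p.1])) PySem.Dict.empty PySem.Dict.nodup_keys_empty
    simpa only [PySem.Dict.keys, hd] using h
  have hfold := foldl_set_add_filter (fun p => pvA_flag p.2 T K) d.items PySem.Set.empty hnd
    (by intro p _ h; simp [PySem.Set.empty] at h)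
  rw [hfold]
  simp only [PySem.Set.empty, List.nil_append]
  rw [List.filter_congr (fun p _ => flag_eq p.2 T K)]
  set L := (d.items.filter (fun p => pvB_attacked p.2 T K)).map (fun p => p.1) with hL
  by_cases hE : L = []
  · rw [hE]; simp [PySem.List.sorted_eq_nil_iff]
  · rw [List.isEmpty_eq_false_iff.mpr hE,
      List.isEmpty_eq_false_iff.mpr (by rw [Ne, PySem.List.sorted_eq_nil_iff]; exact hE)]

-- ===== VERDICT (by name: the statement is the Claim_ definition above) =====
theorem detect_ddos_spec : Claim_equal_detect_ddos := by
  intro logs T K _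
  unfold Spec_detect_ddos
  exact main_eq logs T K
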